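-- pv_equiv track=rewrite | github.com/lpthway/journaling-ai | backend/app/decorators/cache_decorators.py | _generate_cascade_patterns
-- ===== SOURCE A (Python) =====
-- from typing import Any, Callable, Dict, List, Optional, Union, TypeVar
--
-- def _generate_cascade_patterns(base_pattern: str) -> List[str]:
--     """Generate cascade invalidation patterns"""
--     cascade_patterns = []
--
--     # Remove specific parts to create broader patterns
--     if ':' in base_pattern:
--         parts = base_pattern.split(':')
--         # Create patterns with fewer specificity
--         for i in range(len(parts) - 1, 0, -1):
--             cascade_pattern = ':'.join(parts[:i]) + ':*'
--             cascade_patterns.append(cascade_pattern)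
--
--     return cascade_patterns
-- ===== SOURCE B (Python) =====
-- def _generate_cascade_patterns(base_pattern):
--     """Generate cascade invalidation patterns (delimiter-index + slicing strategy)."""
--     positions = [i for i, ch in enumerate(base_pattern) if ch == ':']
--     return [base_pattern[:pos] + ':*' for pos in reversed(positions)]
-- ===== Notes on version B (the rewrite author's own statement) =====
-- stated objective: alternative
-- what changed: Instead of splitting on ':' and re-joining a prefix of the parts for each specificity level, B records the index of every ':' in one scan and slices the original string at each colon position in reverse order.
import Mathlib
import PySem

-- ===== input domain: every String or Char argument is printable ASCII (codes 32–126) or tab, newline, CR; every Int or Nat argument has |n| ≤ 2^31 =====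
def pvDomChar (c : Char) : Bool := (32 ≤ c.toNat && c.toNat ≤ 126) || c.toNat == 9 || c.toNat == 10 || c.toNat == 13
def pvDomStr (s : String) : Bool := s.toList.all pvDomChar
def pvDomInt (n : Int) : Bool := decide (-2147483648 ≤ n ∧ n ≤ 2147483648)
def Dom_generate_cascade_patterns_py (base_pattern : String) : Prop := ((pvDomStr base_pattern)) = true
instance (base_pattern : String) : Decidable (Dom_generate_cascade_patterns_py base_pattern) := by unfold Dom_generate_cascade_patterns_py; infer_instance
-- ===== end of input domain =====

-- B replaces A's split-on-':'-then-rejoin strategy by one scan that collects the index of every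
-- ':' and slices a prefix of the original string at each collected position, in reverse order
-- (objective: alternative decomposition, same asymptotic cost).


-- ===== PORT A =====
-- literal port of A: if ':' in s, split on ':' and, for i in range(len(parts)-1, 0, -1),
-- append ':'.join(parts[:i]) + ':*'
def generate_cascade_patterns_py (base_pattern : String) : List String :=
  let cascade_patterns : List String := []
  if PySem.Str.isIn ":" base_pattern then
    let parts : List (List Char) := PySem.Chars.splitOn base_pattern.toList [':']
    (PySem.List.pyRange ((parts.length : Int) - 1) 0 (-1)).foldl
      (fun acc i =>
        acc ++ [String.ofList (PySem.Chars.join [':']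
                  (PySem.List.slice parts none (some i)) ++ [':', '*'])])
      cascade_patterns
  else cascade_patterns

-- ===== PORT B =====
-- literal port of B: positions = [i for i, ch in enumerate(s) if ch == ':'];
--                    return [s[:pos] + ':*' for pos in reversed(positions)]
def generate_cascade_patterns_py_alt (base_pattern : String) : List String :=
  let cs : List Char := base_pattern.toList
  let positions : List Int :=
    (PySem.List.enumerate cs 0).foldl
      (fun acc p => if p.2 == ':' then acc ++ [p.1] else acc) []
  positions.reverse.map (fun pos =>
    String.ofList (PySem.List.slice cs none (some pos) ++ [':', '*']))

-- ===== PRECONDITION & SPEC =====  (A is total: no Pre_)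
def Spec_generate_cascade_patterns_py (base_pattern : String) (out : List String) : Prop := out = generate_cascade_patterns_py_alt base_pattern
instance (base_pattern : String) (out : List String) : Decidable (Spec_generate_cascade_patterns_py base_pattern out) := by unfold Spec_generate_cascade_patterns_py; infer_instance

-- ===== CLAIM =====
def Claim_equal_generate_cascade_patterns_py : Prop := ∀ (base_pattern : String), Dom_generate_cascade_patterns_py base_pattern → Spec_generate_cascade_patterns_py base_pattern (generate_cascade_patterns_py base_pattern)

-- ===== LEMMAS AND PROOFS =====

-- the prefix of cs ending just before each ':' of cs, in colon order
def colonPrefixes : List Char → List (List Char)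
  | [] => []
  | c :: rest => (if c = ':' then [[]] else []) ++ (colonPrefixes rest).map (c :: ·)

theorem colonPrefixes_eq_nil_of_not_mem (cs : List Char) (h : ':' ∉ cs) :
    colonPrefixes cs = [] := by
  induction cs with
  | nil => rfl
  | cons c rest ih =>
    simp only [List.mem_cons, not_or] at h
    simp [colonPrefixes, Ne.symm h.1, ih h.2]

theorem intercalate_colon_cons_cons (a b : List Char) (l : List (List Char)) :
    [':'].intercalate (a :: b :: l) = a ++ ':' :: [':'].intercalate (b :: l) := by
  simp [List.intercalate]

theorem intercalate_take_cons_head (c : Char) (s0 : List Char) (S : List (List Char)) (i : Nat) :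
    [':'].intercalate (List.take (i + 1) ((c :: s0) :: S))
      = c :: [':'].intercalate (List.take (i + 1) (s0 :: S)) := by
  simp only [List.take_succ_cons]
  cases h : List.take i S with
  | nil => simp [List.intercalate]
  | cons b t => rw [intercalate_colon_cons_cons, intercalate_colon_cons_cons]; simp

theorem splitOn_go_spec (fuel : Nat) (l cur : List Char) (acc : List (List Char)) (h : l.length ≤ fuel) :
    PySem.Chars.splitOn.go [':'] fuel l cur acc
      = acc.reverse ++ (List.splitOn ':' l).modifyHead (cur.reverse ++ ·) := by
  induction fuel generalizing l cur acc with
  | zero =>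
    have : l = [] := by cases l <;> simp_all
    subst this
    simp [PySem.Chars.splitOn.go, List.splitOn]
  | succ fuel ih =>
    cases l with
    | nil => simp [PySem.Chars.splitOn.go, List.splitOn]
    | cons c rest =>
      simp only [PySem.Chars.splitOn.go]
      by_cases hc : c = ':'
      · subst hc
        rw [if_pos (by simp [List.isPrefixOf])]
        rw [ih _ _ _ (by simpa using h)]
        cases hS : List.splitOnP (fun x => x == ':') rest <;>
          simp [List.splitOn, List.splitOnP_cons, hS]
      · rw [if_neg (by simp [List.isPrefixOf, Ne.symm hc])]
        rw [ih _ _ _ (by simpa using Nat.le_of_succ_le_succ (by simpa using h))]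
        have hne := List.splitOnP_ne_nil (fun a => a == ':') rest
        obtain ⟨s0, S, hS⟩ := List.exists_cons_of_ne_nil hne
        simp [List.splitOn, List.splitOnP_cons, hc, hS]

theorem chars_splitOn_eq (cs : List Char) :
    PySem.Chars.splitOn cs [':'] = List.splitOn ':' cs := by
  have := splitOn_go_spec (cs.length + 1) cs [] [] (by omega)
  rw [PySem.Chars.splitOn, this]
  cases h : List.splitOn ':' cs <;> simp

theorem A_core (cs : List Char) :
    (List.range ((List.splitOn ':' cs).length - 1)).map
        (fun i => [':'].intercalate ((List.splitOn ':' cs).take (i + 1)))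
      = colonPrefixes cs := by
  induction cs with
  | nil => simp [List.splitOn, colonPrefixes]
  | cons c rest ih =>
    simp only [List.splitOn] at ih ⊢
    have hne := List.splitOnP_ne_nil (fun a => a == ':') rest
    obtain ⟨s0, S, hS⟩ := List.exists_cons_of_ne_nil hne
    rw [hS] at ih
    by_cases hc : c = ':'
    · subst hc
      simp only [List.splitOnP_cons, beq_self_eq_true, if_pos, hS]
      simp only [List.length_cons, Nat.add_sub_cancel]
      simp only [List.length_cons, Nat.add_sub_cancel] at ih
      rw [List.range_succ_eq_map]
      simp only [List.map_cons, List.map_map, colonPrefixes, if_pos trivial,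
        List.singleton_append]
      refine List.cons_eq_cons.mpr ⟨by simp [List.intercalate], ?_⟩
      rw [← ih, List.map_map]
      apply List.map_congr_left
      intro i hi
      simp only [Function.comp_apply, Nat.succ_eq_add_one, List.take_succ_cons,
        intercalate_colon_cons_cons]
      simp
    · simp only [List.splitOnP_cons, beq_iff_eq, if_neg hc, hS, List.modifyHead_cons]
      simp only [colonPrefixes, if_neg hc, List.nil_append]
      rw [← ih, List.map_map]
      simp only [List.length_cons]
      apply List.map_congr_left
      intro i hi
      exact intercalate_take_cons_head c s0 S i

theorem B_core (cs : List Char) (pre : List Char) :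
    (((PySem.List.enumerate cs (pre.length : Int)).filter (fun p => p.2 == ':')).map
        (fun p => (pre ++ cs).take p.1.toNat))
      = (colonPrefixes cs).map (pre ++ ·) := by
  induction cs generalizing pre with
  | nil => simp [PySem.List.enumerate_nil, colonPrefixes]
  | cons c rest ih =>
    have hshift : (pre.length : Int) + 1 = (((pre ++ [c]).length : Nat) : Int) := by
      simp
    have hrw : pre ++ c :: rest = (pre ++ [c]) ++ rest := by simp
    rw [PySem.List.enumerate_cons]
    by_cases hc : c = ':'
    · subst hc
      simp only [List.filter_cons, beq_self_eq_true, if_pos, List.map_cons]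
      rw [hshift, hrw, ih (pre ++ [':'])]
      simp only [colonPrefixes, if_pos trivial, List.singleton_append, List.map_cons,
        List.map_map]
      refine List.cons_eq_cons.mpr ⟨?_, ?_⟩
      · simp
      · apply List.map_congr_left
        intro q hq
        simp
    · simp only [List.filter_cons]
      rw [if_neg (by simp [hc])]
      rw [hshift, hrw, ih (pre ++ [c])]
      simp only [colonPrefixes, if_neg hc, List.nil_append, List.map_map]
      apply List.map_congr_left
      intro q hq
      simp

theorem positions_nonneg (cs : List Char) (s : Int) (hs : 0 ≤ s) :
    ∀ p ∈ (PySem.List.enumerate cs s).filter (fun p => p.2 == ':'), 0 ≤ p.1 := by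
  intro p hp
  have hmem := List.mem_of_mem_filter hp
  rw [PySem.List.mem_enumerate_iff] at hmem
  obtain ⟨k, hk, rfl⟩ := hmem
  simp only
  omega

theorem alt_eq (s : String) :
    generate_cascade_patterns_py_alt s
      = ((colonPrefixes s.toList).map (fun l => String.ofList (l ++ [':', '*']))).reverse := by
  show (((PySem.List.enumerate s.toList 0).foldl
      (fun acc p => if p.2 == ':' then acc ++ [p.1] else acc) []).reverse.map (fun pos =>
        String.ofList (PySem.List.slice s.toList none (some pos) ++ [':', '*'])))
      = _
  rw [PySem.List.foldl_append_if (p := fun q : Int × Char => q.2 == ':') (f := fun q : Int × Char => q.1)]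
  rw [List.nil_append, List.map_reverse, List.map_map]
  congr 1
  have hcongr : ∀ p ∈ (PySem.List.enumerate s.toList 0).filter (fun p => p.2 == ':'),
      ((fun pos => String.ofList (PySem.List.slice s.toList none (some pos) ++ [':', '*'])) ∘
        (fun p => p.1)) p
        = (fun l => String.ofList (l ++ [':', '*'])) ((fun p : Int × Char => s.toList.take p.1.toNat) p) := by
    intro p hp
    have h0 := positions_nonneg s.toList 0 le_rfl p hp
    simp only [Function.comp_apply]
    rw [PySem.List.slice_to _ h0]
  rw [List.map_congr_left hcongr,
    show (fun a : Int × Char => (fun l => String.ofList (l ++ [':', '*']))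
        ((fun p : Int × Char => s.toList.take p.1.toNat) a))
      = ((fun l => String.ofList (l ++ [':', '*'])) ∘ (fun p : Int × Char => s.toList.take p.1.toNat)) from rfl,
    ← List.map_map]
  have hB := B_core s.toList []
  simp only [List.nil_append, List.length_nil, Nat.cast_zero] at hB
  rw [hB]
  simp

theorem a_eq (s : String) :
    generate_cascade_patterns_py s
      = ((colonPrefixes s.toList).map (fun l => String.ofList (l ++ [':', '*']))).reverse := by
  show (if PySem.Str.isIn ":" s then
      (PySem.List.pyRange (((PySem.Chars.splitOn s.toList [':']).length : Int) - 1) 0 (-1)).foldl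
        (fun acc i => acc ++ [String.ofList (PySem.Chars.join [':']
            (PySem.List.slice (PySem.Chars.splitOn s.toList [':']) none (some i)) ++ [':', '*'])]) []
    else []) = _
  by_cases h : PySem.Str.isIn ":" s = true
  · rw [if_pos h, chars_splitOn_eq]
    have hlen : 0 < (List.splitOn ':' s.toList).length :=
      List.length_pos_of_ne_nil (List.splitOnP_ne_nil _ s.toList)
    rw [PySem.List.foldl_append_singleton_eq_map, List.nil_append]
    rw [PySem.List.pyRange_neg_one_eq_reverse]
    rw [show ((0:Int) + 1) = 1 from by ring,
      show ((List.splitOn ':' s.toList).length : Int) - 1 + 1 = ((List.splitOn ':' s.toList).length : Int) from by ring]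
    rw [List.map_reverse]
    congr 1
    rw [PySem.List.pyRange_one, List.map_map]
    rw [show (((List.splitOn ':' s.toList).length : Int) - 1).toNat
        = (List.splitOn ':' s.toList).length - 1 from by omega]
    rw [← A_core s.toList, List.map_map]
    apply List.map_congr_left
    intro j hj
    have h1 : (0:Int) ≤ 1 + (j : Nat) := by positivity
    simp only [Function.comp_apply, PySem.Chars.join]
    rw [PySem.List.slice_to _ h1]
    rw [show ((1:Int) + (j : Nat)).toNat = j + 1 from by omega]
  · rw [if_neg h]
    have hnotin : ':' ∉ s.toList := by
      intro hmem
      apply h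
      rw [PySem.Str.isIn_iff_infix]
      exact (List.singleton_infix_iff ':' s.toList).mpr (by simpa using hmem)
    rw [colonPrefixes_eq_nil_of_not_mem _ hnotin]
    simp

-- ===== VERDICT =====
theorem generate_cascade_patterns_py_spec : Claim_equal_generate_cascade_patterns_py := by
  intro s _
  unfold Spec_generate_cascade_patterns_py
  rw [a_eq, alt_eq]
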